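-- pv_equiv track=rewrite | github.com/skarin7/play-to-spring-boot-migration-agent | play-to-spring-kit/scripts/migration_orchestrator.py | _pom_declares_dependency
-- ===== SOURCE A (Python) =====
-- def _pom_declares_dependency(text: str, group_id: str, artifact_id: str) -> bool:
--     """Heuristic: same artifactId appears near groupId in pom (handles multi-module)."""
--     if f"<artifactId>{artifact_id}</artifactId>" not in text:
--         return False
--     i = 0
--     while True:
--         j = text.find(f"<artifactId>{artifact_id}</artifactId>", i)
--         if j < 0:
--             return False
--         window = text[max(0, j - 400) : j + 80]
--         if f"<groupId>{group_id}</groupId>" in window: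
--             return True
--         i = j + 1
-- ===== SOURCE B (Python) =====
-- def _pom_declares_dependency(text: str, group_id: str, artifact_id: str) -> bool:
--     """Index-table approach: collect every start index of the group and artifact
--     tags once, then pair them by pure arithmetic on indices (no window slicing)."""
--     gtag = f"<groupId>{group_id}</groupId>"
--     atag = f"<artifactId>{artifact_id}</artifactId>"
--
--     def starts(sub):
--         out = []
--         i = text.find(sub)
--         while i >= 0:
--             out.append(i)
--             i = text.find(sub, i + 1)
--         return out
--
--     gstarts = starts(gtag)
--     glen = len(gtag)
--     return any(
--         any(j - 400 <= g and g + glen <= j + 80 for g in gstarts)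
--         for j in starts(atag)
--     )
-- ===== Notes on version B (the rewrite author's own statement) =====
-- stated objective: alternative
-- what changed: A re-scans a fresh 480-char window slice for the groupId tag at every artifactId occurrence; B instead builds the two occurrence-index tables once with repeated find and decides the pairing by pure index arithmetic (groupId start g must satisfy j-400 <= g and g+len(gtag) <= j+80), with no slicing or per-occurrence substring search.
import Mathlib
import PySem

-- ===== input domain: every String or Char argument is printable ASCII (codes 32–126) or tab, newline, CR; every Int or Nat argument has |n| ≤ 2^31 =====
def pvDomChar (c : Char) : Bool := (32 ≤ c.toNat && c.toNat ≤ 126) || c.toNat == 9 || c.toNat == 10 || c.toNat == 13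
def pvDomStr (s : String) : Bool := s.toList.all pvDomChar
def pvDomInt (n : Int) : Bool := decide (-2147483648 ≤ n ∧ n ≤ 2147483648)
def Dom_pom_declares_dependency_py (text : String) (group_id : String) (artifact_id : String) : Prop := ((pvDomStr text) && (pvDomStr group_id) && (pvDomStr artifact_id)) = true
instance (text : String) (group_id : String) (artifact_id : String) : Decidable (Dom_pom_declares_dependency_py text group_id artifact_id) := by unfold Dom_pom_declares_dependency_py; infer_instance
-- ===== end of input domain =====

-- B replaces A's per-occurrence 480-char window slice + substring scan by two precomputed
-- occurrence-index tables paired by pure index arithmetic (objective: alternative).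

-- ===== PORT A =====
-- f"<groupId>{group_id}</groupId>" / f"<artifactId>{artifact_id}</artifactId>" (shared tag builders)
def pvTagG (group_id : String) : List Char := "<groupId>".toList ++ group_id.toList ++ "</groupId>".toList
def pvTagA (artifact_id : String) : List Char := "<artifactId>".toList ++ artifact_id.toList ++ "</artifactId>".toList

-- the 'while True' loop of A; fuel makes it total (the loop advances i past each hit, so
-- text.length + 1 steps always suffice)
def pvLoopA (tl gtag atag : List Char) : Nat → Nat → Bool
  | 0, _ => false
  | fuel + 1, i =>
    let j := PySem.Chars.findFrom tl atag (i : Int) none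
    if j < 0 then false
    else
      let w := PySem.Chars.slice tl (some (max 0 (j - 400))) (some (j + 80))
      if PySem.Chars.isIn gtag w then true
      else pvLoopA tl gtag atag fuel (j.toNat + 1)

def pom_declares_dependency_py (text : String) (group_id : String) (artifact_id : String) : Bool :=
  let tl := text.toList
  let atag := pvTagA artifact_id
  if PySem.Chars.isIn atag tl then
    pvLoopA tl (pvTagG group_id) atag (tl.length + 1) 0
  else false

-- ===== PORT B =====
-- B's starts(sub): every start index of sub in tl, via repeated find (fuel as above)
def pvStarts (tl sub : List Char) : Nat → Nat → List Nat
  | 0, _ => []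
  | fuel + 1, i =>
    let j := PySem.Chars.findFrom tl sub (i : Int) none
    if j < 0 then []
    else j.toNat :: pvStarts tl sub fuel (j.toNat + 1)

def pom_declares_dependency_py_alt (text : String) (group_id : String) (artifact_id : String) : Bool :=
  let tl := text.toList
  let gtag := pvTagG group_id
  let gstarts := pvStarts tl gtag (tl.length + 1) 0
  let glen : Int := gtag.length
  (pvStarts tl (pvTagA artifact_id) (tl.length + 1) 0).any fun j =>
    gstarts.any fun g =>
      decide ((j : Int) - 400 ≤ (g : Int) ∧ (g : Int) + glen ≤ (j : Int) + 80)

-- ===== PRECONDITION & SPEC =====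
def Spec_pom_declares_dependency_py (text : String) (group_id : String) (artifact_id : String) (out : Bool) : Prop := out = pom_declares_dependency_py_alt text group_id artifact_id
instance (text : String) (group_id : String) (artifact_id : String) (out : Bool) : Decidable (Spec_pom_declares_dependency_py text group_id artifact_id out) := by unfold Spec_pom_declares_dependency_py; infer_instance

-- ===== CLAIM (what is proved, stated in full; the proofs are below) =====
def Claim_equal_pom_declares_dependency_py : Prop := ∀ (text : String) (group_id : String) (artifact_id : String), Dom_pom_declares_dependency_py text group_id artifact_id → Spec_pom_declares_dependency_py text group_id artifact_id (pom_declares_dependency_py text group_id artifact_id)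

-- ===== LEMMAS AND PROOFS =====

-- an occurrence of a nonempty pattern lies strictly inside the text
lemma pv_occ_lt_length {tl sub : List Char} (hs : sub ≠ []) {g : Nat}
    (h : sub <+: tl.drop g) : g < tl.length := by
  by_contra hge
  rw [List.drop_eq_nil_of_le (by omega)] at h
  exact hs (List.prefix_nil.mp h)

-- if sub does not occur in tl.drop k, it occurs at no index ≥ k
lemma pv_no_occ_of_not_infix {tl sub : List Char} {k : Nat}
    (h : ¬ sub <:+: tl.drop k) : ∀ g : Nat, k ≤ g → ¬ sub <+: tl.drop g := by
  intro g hkg hpre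
  apply h
  rw [← PySem.Chars.isIn_iff_infix, ← PySem.Chars.exists_prefix_drop_iff_isIn]
  exact ⟨g - k, by rwa [List.drop_drop, Nat.add_sub_cancel' hkg]⟩

-- A's window test, characterised by index arithmetic
lemma pv_window_iff (tl gtag : List Char) (hg : gtag ≠ []) (jn : Nat) :
    PySem.Chars.isIn gtag
      (PySem.Chars.slice tl (some (max 0 ((jn : Int) - 400))) (some ((jn : Int) + 80))) = true
    ↔ ∃ g : Nat, jn - 400 ≤ g ∧ g + gtag.length ≤ jn + 80 ∧ gtag <+: tl.drop g := by
  have hL : 0 < gtag.length := List.length_pos_iff.mpr hg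
  have h1 : (max 0 ((jn : Int) - 400)) = ((jn - 400 : Nat) : Int) := by omega
  have h2 : ((jn : Int) + 80) = ((jn + 80 : Nat) : Int) := by omega
  rw [h1, h2, PySem.Chars.slice_eq_listSlice, PySem.List.slice_natCast, ← PySem.Chars.exists_prefix_drop_iff_isIn]
  constructor
  · rintro ⟨k, hk⟩
    rw [List.drop_take, List.drop_drop, List.prefix_take_iff] at hk
    exact ⟨jn - 400 + k, by omega, by omega, hk.1⟩
  · rintro ⟨g, hlo, hhi, hpre⟩
    refine ⟨g - (jn - 400), ?_⟩
    rw [List.drop_take, List.drop_drop, List.prefix_take_iff]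
    exact ⟨by rwa [Nat.add_sub_cancel' hlo], by omega⟩

-- pvStarts collects exactly the occurrence indices ≥ i
lemma pv_starts_spec (tl sub : List Char) (hs : sub ≠ []) :
    ∀ (fuel i : Nat), i ≤ tl.length → tl.length + 1 ≤ fuel + i →
      ∀ g : Nat, g ∈ pvStarts tl sub fuel i ↔ i ≤ g ∧ sub <+: tl.drop g := by
  intro fuel
  induction fuel with
  | zero => intro i hi hfuel; omega
  | succ fuel ih =>
    intro i hi hfuel g
    rw [pvStarts]
    by_cases hneg : PySem.Chars.findFrom tl sub (i : Int) none = -1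
    · rw [hneg]
      simp only [if_pos (by norm_num : (-1 : Int) < 0), List.not_mem_nil, false_iff]
      have hinf := (PySem.Chars.findFrom_natCast_eq_neg_one_iff tl sub i hi).mp hneg
      intro ⟨hig, hpre⟩
      exact pv_no_occ_of_not_infix hinf g hig hpre
    · obtain ⟨hij, hpre, hmin⟩ := PySem.Chars.findFrom_natCast_spec tl sub i hi hneg
      set j := PySem.Chars.findFrom tl sub (i : Int) none with hj
      have hjn : j.toNat < tl.length := pv_occ_lt_length hs hpre
      have hij' : i ≤ j.toNat := by omega
      rw [if_neg (by omega)]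
      rw [List.mem_cons, ih (j.toNat + 1) (by omega) (by omega) g]
      constructor
      · rintro (rfl | ⟨hg, hp⟩)
        · exact ⟨hij', hpre⟩
        · exact ⟨by omega, hp⟩
      · rintro ⟨hig, hp⟩
        by_cases hlt : g < j.toNat
        · exact absurd hp (hmin g hig hlt)
        · by_cases heq : g = j.toNat
          · exact Or.inl heq
          · exact Or.inr ⟨by omega, hp⟩

-- A's loop returns true iff some artifact occurrence ≥ i has a group occurrence in its window
set_option maxRecDepth 8192 in
lemma pv_loopA_spec (tl gtag atag : List Char) (hg : gtag ≠ []) (ha : atag ≠ []) :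
    ∀ (fuel i : Nat), i ≤ tl.length → tl.length + 1 ≤ fuel + i →
      (pvLoopA tl gtag atag fuel i = true ↔
        ∃ j : Nat, i ≤ j ∧ atag <+: tl.drop j ∧
          ∃ g : Nat, j - 400 ≤ g ∧ g + gtag.length ≤ j + 80 ∧ gtag <+: tl.drop g) := by
  intro fuel
  induction fuel with
  | zero => intro i hi hfuel; omega
  | succ fuel ih =>
    intro i hi hfuel
    rw [pvLoopA]
    by_cases hneg : PySem.Chars.findFrom tl atag (i : Int) none = -1
    · rw [hneg]
      simp only [if_pos (by norm_num : (-1 : Int) < 0), Bool.false_eq_true, false_iff]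
      have hinf := (PySem.Chars.findFrom_natCast_eq_neg_one_iff tl atag i hi).mp hneg
      rintro ⟨j, hij, hpre, -⟩
      exact pv_no_occ_of_not_infix hinf j hij hpre
    · obtain ⟨hij, hpre, hmin⟩ := PySem.Chars.findFrom_natCast_spec tl atag i hi hneg
      set j := PySem.Chars.findFrom tl atag (i : Int) none with hjdef
      have hjn : j.toNat < tl.length := pv_occ_lt_length ha hpre
      have hij' : i ≤ j.toNat := by omega
      rw [if_neg (by omega)]
      have hjcast : j = ((j.toNat : Nat) : Int) := by omega
      by_cases hwin : PySem.Chars.isIn gtag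
          (PySem.Chars.slice tl (some (max 0 (j - 400))) (some (j + 80))) = true
      · rw [if_pos hwin]
        have hwin2 : ∃ g : Nat, j.toNat - 400 ≤ g ∧ g + gtag.length ≤ j.toNat + 80 ∧
            gtag <+: tl.drop g := by
          rw [← pv_window_iff tl gtag hg j.toNat,
            show ((j.toNat : Nat) : Int) = j from by omega]
          exact hwin
        simp only [true_iff]
        exact ⟨j.toNat, hij', hpre, hwin2⟩
      · rw [if_neg hwin]
        rw [ih (j.toNat + 1) (by omega) (by omega)]
        constructor
        · rintro ⟨j', h1, h2, h3⟩
          exact ⟨j', by omega, h2, h3⟩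
        · rintro ⟨j', h1, h2, h3⟩
          by_cases hlt : j' < j.toNat
          · exact absurd h2 (hmin j' h1 hlt)
          · by_cases heq : j' = j.toNat
            · obtain ⟨g, hgl, hgh, hgp⟩ := h3
              have hw := (pv_window_iff tl gtag hg j.toNat).mpr ⟨g, by omega, by omega, hgp⟩
              rw [show ((j.toNat : Nat) : Int) = j from by omega] at hw
              exact absurd hw hwin
            · exact ⟨j', by omega, h2, h3⟩

lemma pv_tagG_ne (group_id : String) : pvTagG group_id ≠ [] := by
  simp [pvTagG]

lemma pv_tagA_ne (artifact_id : String) : pvTagA artifact_id ≠ [] := by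
  simp [pvTagA]

-- ===== VERDICT (by name: the statement is the Claim_ definition above) =====
theorem pom_declares_dependency_py_spec : Claim_equal_pom_declares_dependency_py := by
  intro text group_id artifact_id _
  unfold Spec_pom_declares_dependency_py
  unfold pom_declares_dependency_py pom_declares_dependency_py_alt
  set tl := text.toList
  set gtag := pvTagG group_id
  set atag := pvTagA artifact_id
  have hg := pv_tagG_ne group_id
  have ha := pv_tagA_ne artifact_id
  have hstartsA := pv_starts_spec tl atag ha (tl.length + 1) 0 (by omega) (by omega)
  have hstartsG := pv_starts_spec tl gtag hg (tl.length + 1) 0 (by omega) (by omega)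
  rw [Bool.eq_iff_iff]
  simp only [List.any_eq_true, decide_eq_true_eq]
  constructor
  · intro hA
    by_cases hin : PySem.Chars.isIn atag tl = true
    · rw [if_pos hin] at hA
      obtain ⟨j, -, hjp, g, hlo, hhi, hgp⟩ :=
        (pv_loopA_spec tl gtag atag hg ha (tl.length + 1) 0 (by omega) (by omega)).mp hA
      exact ⟨j, (hstartsA j).mpr ⟨Nat.zero_le _, hjp⟩,
        g, (hstartsG g).mpr ⟨Nat.zero_le _, hgp⟩, by omega, by omega⟩
    · rw [if_neg hin] at hA; exact absurd hA (by simp)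
  · rintro ⟨j, hjmem, g, hgmem, hlo, hhi⟩
    obtain ⟨-, hjp⟩ := (hstartsA j).mp hjmem
    obtain ⟨-, hgp⟩ := (hstartsG g).mp hgmem
    have hin : PySem.Chars.isIn atag tl = true := by
      rw [← PySem.Chars.exists_prefix_drop_iff_isIn]; exact ⟨j, hjp⟩
    rw [if_pos hin]
    exact (pv_loopA_spec tl gtag atag hg ha (tl.length + 1) 0 (by omega) (by omega)).mpr
      ⟨j, Nat.zero_le _, hjp, g, by omega, by omega, hgp⟩
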